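-- pv_equiv track=rewrite | github.com/jbah1/pdfocr | test_all_psm_modes.py | detect_columns_from_lines
-- ===== SOURCE A (Python) =====
-- def detect_columns_from_lines(lines, page_width, max_column_gap=100):
--     """Detect columns based on line positions."""
--     if not lines:
--         return []
--
--     # Sort lines by left position of first word
--     lines_sorted = sorted(lines, key=lambda line: line[0]['left'])
--
--     columns = []
--     current_column = []
--     last_right = -1
--
--     for line in lines_sorted:
--         line_left = line[0]['left']
--         line_right = line[-1]['right']
--
--         if current_column and (line_left - last_right > max_column_gap):
--             columns.append(current_column)
--             current_column = []
--
--         current_column.extend(line)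
--         last_right = line_right
--
--     if current_column:
--         columns.append(current_column)
--
--     # If we have too many columns (more than 5), try with a larger gap
--     if len(columns) > 5:
--         return detect_columns_with_larger_gap(lines, page_width, max_column_gap * 3)
--
--     return columns
--
-- def detect_columns_with_larger_gap(lines, page_width, max_column_gap=300):
--     """Detect columns with a larger gap threshold."""
--     if not lines:
--         return []
--
--     # Sort lines by left position of first word
--     lines_sorted = sorted(lines, key=lambda line: line[0]['left'])
--
--     columns = []
--     current_column = []
--     last_right = -1
--
--     for line in lines_sorted:
--         line_left = line[0]['left']
--         line_right = line[-1]['right']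
--
--         if current_column and (line_left - last_right > max_column_gap):
--             columns.append(current_column)
--             current_column = []
--
--         current_column.extend(line)
--         last_right = line_right
--
--     if current_column:
--         columns.append(current_column)
--
--     return columns
-- ===== SOURCE B (Python) =====
-- def detect_columns_from_lines(lines, page_width, max_column_gap=100):
--     """Detect columns: precompute the inter-line gaps once, pick the threshold
--     arithmetically (triple it when the gap count would give >5 columns), then
--     build the columns in a single pass."""
--     if not lines:
--         return []
--     ls = sorted(lines, key=lambda line: line[0]['left'])
--     gaps = [cur[0]['left'] - prev[-1]['right'] for prev, cur in zip(ls, ls[1:])]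
--     t = max_column_gap if sum(g > max_column_gap for g in gaps) < 5 else max_column_gap * 3
--     columns = [list(ls[0])]
--     for line, g in zip(ls[1:], gaps):
--         if g > t:
--             columns.append(list(line))
--         else:
--             columns[-1].extend(line)
--     return columns
-- ===== Notes on version B (the rewrite author's own statement) =====
-- stated objective: alternative
-- what changed: A groups with a (columns, current_column, last_right) accumulator and, when more than 5 columns result, recurses into a duplicated function that re-sorts and re-groups at the tripled gap; B precomputes the list of adjacent gaps once, picks the threshold up front by counting how many gaps exceed max_column_gap, and builds the columns in a single pass that extends the last column in place.
import Mathlib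
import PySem

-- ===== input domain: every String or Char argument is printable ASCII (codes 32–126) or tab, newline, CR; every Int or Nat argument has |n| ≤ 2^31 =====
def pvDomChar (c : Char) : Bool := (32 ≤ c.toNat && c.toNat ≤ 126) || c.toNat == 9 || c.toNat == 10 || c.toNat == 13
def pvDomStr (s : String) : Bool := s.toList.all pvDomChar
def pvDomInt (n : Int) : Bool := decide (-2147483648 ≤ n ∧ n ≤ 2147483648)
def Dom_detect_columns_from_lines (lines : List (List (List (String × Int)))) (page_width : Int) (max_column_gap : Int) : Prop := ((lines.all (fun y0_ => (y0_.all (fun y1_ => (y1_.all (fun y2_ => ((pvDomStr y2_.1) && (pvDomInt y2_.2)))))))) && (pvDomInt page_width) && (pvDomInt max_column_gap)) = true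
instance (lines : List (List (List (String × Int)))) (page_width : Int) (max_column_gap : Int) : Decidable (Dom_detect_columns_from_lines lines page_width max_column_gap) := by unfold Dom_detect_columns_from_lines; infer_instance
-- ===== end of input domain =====

-- B replaces A's accumulator grouping plus recursion into a duplicated re-sort-and-regroup
-- function by: precompute the adjacent gap list once, pick the threshold arithmetically by
-- counting large gaps, build the columns in a single pass (objective: alternative).
-- A column is a flat list of words; a line is also a list of words.

-- ===== PORT A =====
-- line[0]['left'] (0 default is never used inside Pre_)
def pvLineLeft (line : List (List (String × Int))) : Int :=
  match PySem.List.pyGet? line 0 with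
  | some w => (w.lookup "left").getD 0
  | none => 0

-- line[-1]['right']
def pvLineRight (line : List (List (String × Int))) : Int :=
  match PySem.List.pyGet? line (-1) with
  | some w => (w.lookup "right").getD 0
  | none => 0

-- the loop body shared verbatim by A's two Python functions: state (columns, current_column, last_right)
def pvStepA (t : Int) (st : List (List (List (String × Int))) × List (List (String × Int)) × Int)
    (line : List (List (String × Int))) : List (List (List (String × Int))) × List (List (String × Int)) × Int :=
  let line_left := pvLineLeft line
  let line_right := pvLineRight line
  if st.2.1 ≠ [] ∧ line_left - st.2.2 > t then (st.1 ++ [st.2.1], [] ++ line, line_right)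
  else (st.1, st.2.1 ++ line, line_right)

def detect_columns_with_larger_gap (lines : List (List (List (String × Int)))) (page_width : Int) (max_column_gap : Int) : List (List (List (String × Int))) :=
  if lines = [] then []
  else
    let lines_sorted := PySem.List.sorted lines (fun line => pvLineLeft line) false
    let st := lines_sorted.foldl (pvStepA max_column_gap) ([], [], -1)
    if st.2.1 ≠ [] then st.1 ++ [st.2.1] else st.1

def detect_columns_from_lines (lines : List (List (List (String × Int)))) (page_width : Int) (max_column_gap : Int) : List (List (List (String × Int))) :=
  if lines = [] then []
  else
    let lines_sorted := PySem.List.sorted lines (fun line => pvLineLeft line) false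
    let st := lines_sorted.foldl (pvStepA max_column_gap) ([], [], -1)
    let columns := if st.2.1 ≠ [] then st.1 ++ [st.2.1] else st.1
    if columns.length > 5 then detect_columns_with_larger_gap lines page_width (max_column_gap * 3)
    else columns

-- ===== PORT B =====
-- B's loop body: either start a new column or extend the last one
def pvStepB (t : Int) (cols : List (List (List (String × Int))))
    (lg : List (List (String × Int)) × Int) : List (List (List (String × Int))) :=
  if lg.2 > t then cols ++ [lg.1]
  else cols.dropLast ++ [cols.getLastD [] ++ lg.1]

def detect_columns_from_lines_alt (lines : List (List (List (String × Int)))) (page_width : Int) (max_column_gap : Int) : List (List (List (String × Int))) :=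
  if lines = [] then []
  else
    let ls := PySem.List.sorted lines (fun line => pvLineLeft line) false
    let gaps := (ls.zip ls.tail).map (fun pc => pvLineLeft pc.2 - pvLineRight pc.1)
    let t := if (gaps.filter (fun x => x > max_column_gap)).length < 5 then max_column_gap
             else max_column_gap * 3
    (ls.tail.zip gaps).foldl (pvStepB t) [ls.headD []]

-- ===== PRECONDITION & SPEC =====
-- Pre_ excludes exactly the inputs on which Python A raises: a line that is the empty list
-- (IndexError on line[0]) or whose first word lacks 'left' / last word lacks 'right' (KeyError).
def Pre_detect_columns_from_lines (lines : List (List (List (String × Int)))) (page_width : Int) (max_column_gap : Int) : Prop :=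
  (lines.all (fun line => !line.isEmpty
      && ((line.headD []).lookup "left").isSome
      && ((line.getLastD []).lookup "right").isSome)) = true
instance (lines : List (List (List (String × Int)))) (page_width : Int) (max_column_gap : Int) : Decidable (Pre_detect_columns_from_lines lines page_width max_column_gap) := by unfold Pre_detect_columns_from_lines; infer_instance

def pvWitness_detect_columns_from_lines : (List (List (List (String × Int)))) × Int × Int :=
  ([[[("left", 0), ("right", 5)]], [[("left", 200), ("right", 230)]]], 300, 100)

def Spec_detect_columns_from_lines (lines : List (List (List (String × Int)))) (page_width : Int) (max_column_gap : Int) (out : List (List (List (String × Int)))) : Prop := out = detect_columns_from_lines_alt lines page_width max_column_gap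
instance (lines : List (List (List (String × Int)))) (page_width : Int) (max_column_gap : Int) (out : List (List (List (String × Int)))) : Decidable (Spec_detect_columns_from_lines lines page_width max_column_gap out) := by unfold Spec_detect_columns_from_lines; infer_instance

-- ===== CLAIM (what is proved, stated in full; the proofs are below) =====
def Claim_equal_detect_columns_from_lines : Prop := ∀ (lines : List (List (List (String × Int)))) (page_width : Int) (max_column_gap : Int), Dom_detect_columns_from_lines lines page_width max_column_gap → Pre_detect_columns_from_lines lines page_width max_column_gap → Spec_detect_columns_from_lines lines page_width max_column_gap (detect_columns_from_lines lines page_width max_column_gap)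

-- ===== LEMMAS AND PROOFS =====

-- the gap sequence of consecutive sorted lines, as a recursion
def pvGapsF (prev : List (List (String × Int))) : List (List (List (String × Int))) → List Int
  | [] => []
  | l :: rs => (pvLineLeft l - pvLineRight prev) :: pvGapsF l rs

theorem pvGapsF_eq_zip (prev : List (List (String × Int))) (rest : List (List (List (String × Int)))) :
    ((prev :: rest).zip rest).map (fun pc => pvLineLeft pc.2 - pvLineRight pc.1) = pvGapsF prev rest := by
  induction rest generalizing prev with
  | nil => rfl
  | cons l rs ih => simp [pvGapsF, List.zip, ← ih l]

theorem pv_loop_eq (t : Int) (rest : List (List (List (String × Int)))) :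
    ∀ (prev : List (List (String × Int))) (cols : List (List (List (String × Int))))
      (cur : List (List (String × Int))), cur ≠ [] → (∀ l ∈ rest, l ≠ []) →
    (if (rest.foldl (pvStepA t) (cols, cur, pvLineRight prev)).2.1 ≠ [] then
       (rest.foldl (pvStepA t) (cols, cur, pvLineRight prev)).1
         ++ [(rest.foldl (pvStepA t) (cols, cur, pvLineRight prev)).2.1]
     else (rest.foldl (pvStepA t) (cols, cur, pvLineRight prev)).1) =
    (rest.zip (pvGapsF prev rest)).foldl (pvStepB t) (cols ++ [cur]) := by
  induction rest with
  | nil => intro prev cols cur hcur _; simp [hcur]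
  | cons l rs ih =>
    intro prev cols cur hcur hne
    have hl : l ≠ [] := hne l (by simp)
    have hrs : ∀ x ∈ rs, x ≠ [] := fun x hx => hne x (by simp [hx])
    simp only [pvGapsF, List.zip_cons_cons, List.foldl_cons]
    by_cases hgap : pvLineLeft l - pvLineRight prev > t
    · have hA : pvStepA t (cols, cur, pvLineRight prev) l = (cols ++ [cur], l, pvLineRight l) := by
        simp [pvStepA, hcur, hgap]
      have hB : pvStepB t (cols ++ [cur]) (l, pvLineLeft l - pvLineRight prev) = (cols ++ [cur]) ++ [l] := by
        simp [pvStepB, hgap]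
      rw [hA, hB]
      exact ih l (cols ++ [cur]) l hl hrs
    · have hA : pvStepA t (cols, cur, pvLineRight prev) l = (cols, cur ++ l, pvLineRight l) := by
        simp [pvStepA, hgap]
      have hB : pvStepB t (cols ++ [cur]) (l, pvLineLeft l - pvLineRight prev) = cols ++ [cur ++ l] := by
        simp [pvStepB, hgap]
      rw [hA, hB]
      have := ih l cols (cur ++ l) (by simp [hcur]) hrs
      simpa using this

theorem pv_length_foldB (t : Int) (rest : List (List (List (String × Int)))) :
    ∀ (prev : List (List (String × Int))) (acc : List (List (List (String × Int)))), acc ≠ [] →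
    ((rest.zip (pvGapsF prev rest)).foldl (pvStepB t) acc).length
      = acc.length + ((pvGapsF prev rest).filter (fun x => x > t)).length := by
  induction rest with
  | nil => intro prev acc _; simp [pvGapsF]
  | cons l rs ih =>
    intro prev acc hacc
    simp only [pvGapsF, List.zip_cons_cons, List.foldl_cons, List.filter_cons]
    by_cases hgap : pvLineLeft l - pvLineRight prev > t
    · have hB : pvStepB t acc (l, pvLineLeft l - pvLineRight prev) = acc ++ [l] := by
        simp [pvStepB, hgap]
      rw [hB, ih l (acc ++ [l]) (by simp)]
      simp [hgap]
      try omega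
    · have hB : pvStepB t acc (l, pvLineLeft l - pvLineRight prev)
          = acc.dropLast ++ [acc.getLastD [] ++ l] := by
        simp [pvStepB, hgap]
      rw [hB, ih l _ (by simp)]
      have : (acc.dropLast ++ [acc.getLastD [] ++ l]).length = acc.length := by
        simp [List.length_dropLast]
        cases acc with
        | nil => exact absurd rfl hacc
        | cons a as => simp
      rw [this]
      simp [hgap]

-- ===== VERDICT (by name: the statement is the Claim_ definition above) =====
theorem detect_columns_from_lines_spec : Claim_equal_detect_columns_from_lines := by
  intro lines page_width g _hdom hpre
  unfold Spec_detect_columns_from_lines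
  by_cases hne : lines = []
  · simp [detect_columns_from_lines, detect_columns_from_lines_alt, hne]
  · have h : ∀ l ∈ lines, l ≠ [] := by
      intro l hl
      have := (List.all_eq_true.1 hpre) l hl
      simp at this
      exact this.1.1
    unfold detect_columns_from_lines detect_columns_from_lines_alt detect_columns_with_larger_gap
    simp only [hne, if_false]
    set ls := PySem.List.sorted lines (fun line => pvLineLeft line) false with hls
    have hmem : ∀ l ∈ ls, l ≠ [] := by
      intro l hl
      exact h l ((PySem.List.mem_sorted _ _ _ _).1 hl)
    have hlsne : ls ≠ [] := by
      have hlen := PySem.List.length_sorted lines (fun line => pvLineLeft line) false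
      intro hnil
      rw [hls] at hnil
      rw [hnil] at hlen
      exact hne (List.eq_nil_of_length_eq_zero hlen.symm)
    obtain ⟨l0, rest, hcons⟩ := List.exists_cons_of_ne_nil hlsne
    have h0 : l0 ≠ [] := hmem l0 (by rw [hcons]; simp)
    have hrest : ∀ l ∈ rest, l ≠ [] := fun l hl => hmem l (by rw [hcons]; simp [hl])
    rw [hcons]
    have hstep0g : pvStepA g ([], [], -1) l0 = ([], l0, pvLineRight l0) := by simp [pvStepA]
    have hstep03 : pvStepA (g * 3) ([], [], -1) l0 = ([], l0, pvLineRight l0) := by simp [pvStepA]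
    simp only [List.foldl_cons, List.tail_cons, List.headD_cons, hstep0g, hstep03,
      pvGapsF_eq_zip l0 rest]
    have hA := pv_loop_eq g rest l0 [] l0 h0 hrest
    have hA3 := pv_loop_eq (g * 3) rest l0 [] l0 h0 hrest
    simp only [List.nil_append] at hA hA3
    have hlen := pv_length_foldB g rest l0 [l0] (by simp)
    rw [hA, hA3, hlen]
    simp only [List.length_singleton]
    split_ifs with h1 h2 <;> first | rfl | (exfalso; omega)
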